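-- pv_equiv track=rewrite | github.com/keithpatton/brain-sync | src/brain_sync/regen.py | compute_waves
-- ===== SOURCE A (Python) =====
-- def compute_waves(paths: list[str]) -> list[list[str]]:
--     """Compute depth-ordered waves from leaf paths including all ancestors.
--
--     Returns waves deepest-first. Each wave is sorted for determinism.
--     Root ("") is always included if any paths are provided.
--     """
--     if not paths:
--         return []
--
--     by_depth: dict[int, set[str]] = {}
--     for path in paths:
--         p = path
--         while True:
--             depth = 0 if not p else len(p.split("/"))
--             by_depth.setdefault(depth, set()).add(p)
--             if not p:
--                 break
--             parts = p.rsplit("/", 1)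
--             p = parts[0] if len(parts) > 1 else ""
--     return [sorted(by_depth[d]) for d in sorted(by_depth, reverse=True)]
-- ===== SOURCE B (Python) =====
-- def compute_waves(paths: list[str]) -> list[list[str]]:
--     """Single left-to-right scan per path: record each non-empty prefix ending
--     before a '/' at its depth (slashes seen + 1) in a depth-indexed list of sets,
--     then emit the non-empty buckets deepest-first, each sorted."""
--     if not paths:
--         return []
--     waves = [{""}]
--     for path in paths:
--         depth = 1
--         for i, ch in enumerate(path):
--             if ch == "/":
--                 prefix = path[:i]
--                 if prefix:
--                     while len(waves) <= depth:
--                         waves.append(set())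
--                     waves[depth].add(prefix)
--                 depth += 1
--         if path:
--             while len(waves) <= depth:
--                 waves.append(set())
--             waves[depth].add(path)
--     return [sorted(s) for s in reversed(waves) if s]
-- ===== Notes on version B (the rewrite author's own statement) =====
-- stated objective: alternative
-- what changed: Instead of repeatedly re-splitting each path while walking up its ancestor chain into a dict keyed by depth, B makes one left-to-right scan per path, emitting each non-empty prefix at a '/' boundary into a depth-indexed list of sets (depth tracked incrementally), and renders by reversing the list and dropping empty buckets instead of sorting dict keys.
import Mathlib
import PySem

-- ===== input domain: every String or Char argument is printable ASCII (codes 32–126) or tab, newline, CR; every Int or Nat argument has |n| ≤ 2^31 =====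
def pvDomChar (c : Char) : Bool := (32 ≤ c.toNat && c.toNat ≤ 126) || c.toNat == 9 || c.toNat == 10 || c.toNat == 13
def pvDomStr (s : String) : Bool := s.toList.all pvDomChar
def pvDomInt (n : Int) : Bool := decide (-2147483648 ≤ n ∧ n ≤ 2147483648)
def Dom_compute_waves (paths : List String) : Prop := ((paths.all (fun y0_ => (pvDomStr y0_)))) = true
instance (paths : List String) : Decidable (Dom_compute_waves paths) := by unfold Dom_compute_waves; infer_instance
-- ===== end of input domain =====

-- B replaces A's per-ancestor re-splitting (split + rsplit per step, dict keyed by depth) with one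
-- left-to-right scan per path into a depth-indexed list of sets, rendered by reversal instead of key sorting.

-- ===== PORT A =====

-- exact hand port of p.rsplit("/", 1): 'some (pre, post)' (split at the LAST '/') when '/' occurs, 'none' when it does not
def rsplitSlash : List Char → Option (List Char × List Char)
  | [] => none
  | c :: rest =>
    match rsplitSlash rest with
    | some (a, b) => some (c :: a, b)
    | none => if c = '/' then some ([], rest) else none

-- a successful rsplit splits the list (used for termination of the while-loop port)
lemma rsplitSlash_some_append : ∀ {cs a b : List Char}, rsplitSlash cs = some (a, b) →
    cs = a ++ '/' :: b := by
  intro cs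
  induction cs with
  | nil => intro a b h; simp [rsplitSlash] at h
  | cons c rest ih =>
    intro a b h
    simp only [rsplitSlash] at h
    cases hr : rsplitSlash rest with
    | some ab =>
      obtain ⟨a', b'⟩ := ab
      rw [hr] at h
      simp at h
      obtain ⟨ha, hb⟩ := h
      subst ha; subst hb
      simp [ih hr]
    | none =>
      rw [hr] at h
      by_cases hc : c = '/'
      · simp [hc] at h
        obtain ⟨ha, hb⟩ := h
        subst ha; subst hb
        simp [hc]
      · simp [hc] at h

-- the while-loop of A, recursing on the parent path
def awLoop (byDepth : PySem.Dict Int (PySem.Set String)) (p : List Char) :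
    PySem.Dict Int (PySem.Set String) :=
  let depth : Int := if p = [] then 0 else ((PySem.Chars.splitOn p ['/']).length : Int)
  let d' := byDepth.modify depth PySem.Set.empty (fun s => PySem.Set.add s (String.ofList p))
  if hp : p = [] then d'
  else
    match hr : rsplitSlash p with
    | some (a, _b) => awLoop d' a
    | none => awLoop d' []
termination_by p.length
decreasing_by
  · have h := rsplitSlash_some_append hr
    subst h; simp
  · simp only [List.length_nil]
    cases p with
    | nil => exact absurd rfl hp
    | cons c r => simp

def compute_waves (paths : List String) : List (List String) :=
  if paths.isEmpty then []
  else
    let d := paths.foldl (fun acc path => awLoop acc path.toList) PySem.Dict.empty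
    (PySem.List.sorted d.keys (fun k => k) true).map
      (fun k => PySem.List.sorted (d.getD k PySem.Set.empty) (fun s => s) false)

-- ===== PORT B =====

-- the 'while len(waves) <= depth: waves.append(set())' loop of _bucket_add
def padWaves (waves : List (PySem.Set String)) (depth : Int) : List (PySem.Set String) :=
  if h : (waves.length : Int) ≤ depth then padWaves (waves ++ [PySem.Set.empty]) depth else waves
termination_by (depth + 1 - waves.length).toNat
decreasing_by
  simp only [List.length_append, List.length_cons, List.length_nil]
  omega

-- _bucket_add: pad, then waves[depth].add(s)
def addWave (waves : List (PySem.Set String)) (depth : Int) (s : String) : List (PySem.Set String) :=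
  let w := padWaves waves depth
  PySem.List.pySetD w depth (PySem.Set.add (PySem.List.pyGetD w depth PySem.Set.empty) s)

-- one path: scan characters left to right, tracking the running depth
def bwPath (waves : List (PySem.Set String)) (path : String) : List (PySem.Set String) :=
  let st := (PySem.List.enumerate path.toList).foldl
    (fun (st : List (PySem.Set String) × Int) ic =>
      if ic.2 = '/' then
        let pre := PySem.Str.slice path none (some ic.1)
        if pre ≠ "" then (addWave st.1 st.2 pre, st.2 + 1) else (st.1, st.2 + 1)
      else st)
    (waves, 1)
  if path ≠ "" then addWave st.1 st.2 path else st.1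

def compute_waves_alt (paths : List String) : List (List String) :=
  if paths.isEmpty then []
  else
    let waves := paths.foldl bwPath [PySem.Set.ofList [""]]
    (waves.reverse.filter (fun s => !s.isEmpty)).map
      (fun s => PySem.List.sorted s (fun x => x) false)

-- ===== PRECONDITION & SPEC =====
def Spec_compute_waves (paths : List String) (out : List (List String)) : Prop := out = compute_waves_alt paths
instance (paths : List String) (out : List (List String)) : Decidable (Spec_compute_waves paths out) := by unfold Spec_compute_waves; infer_instance

-- ===== CLAIM (what is proved, stated in full; the proofs are below) =====
def Claim_equal_compute_waves : Prop := ∀ (paths : List String), Dom_compute_waves paths → Spec_compute_waves paths (compute_waves paths)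

-- ===== LEMMAS AND PROOFS =====

-- rsplit finds no split point exactly when '/' is absent
lemma not_mem_of_rsplitSlash_none : ∀ {cs : List Char}, rsplitSlash cs = none → '/' ∉ cs := by
  intro cs
  induction cs with
  | nil => intro _; simp
  | cons c rest ih =>
    intro h
    simp only [rsplitSlash] at h
    cases hr : rsplitSlash rest with
    | some ab => rw [hr] at h; cases ab; simp at h
    | none =>
      rw [hr] at h
      by_cases hc : c = '/'
      · simp [hc] at h
      · simp only [List.mem_cons, not_or]
        exact ⟨fun hh => hc hh.symm, ih hr⟩

lemma rsplitSlash_some_eq : ∀ {cs a b : List Char}, rsplitSlash cs = some (a, b) →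
    cs = a ++ '/' :: b ∧ '/' ∉ b := by
  intro cs
  induction cs with
  | nil => intro a b h; simp [rsplitSlash] at h
  | cons c rest ih =>
    intro a b h
    simp only [rsplitSlash] at h
    cases hr : rsplitSlash rest with
    | some ab =>
      obtain ⟨a', b'⟩ := ab
      rw [hr] at h
      simp at h
      obtain ⟨ha, hb⟩ := h
      obtain ⟨h1, h2⟩ := ih hr
      subst ha; subst hb; simp [h1, h2]
    | none =>
      rw [hr] at h
      by_cases hc : c = '/'
      · simp [hc] at h
        obtain ⟨ha, hb⟩ := h
        subst ha
        refine ⟨by simp [hc, hb], ?_⟩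
        rw [← hb]
        exact not_mem_of_rsplitSlash_none hr
      · simp [hc] at h

-- abbreviations for the two bucket structures
def addPairA (d : PySem.Dict Int (PySem.Set String)) (p : Int × String) :
    PySem.Dict Int (PySem.Set String) :=
  d.modify p.1 PySem.Set.empty (fun s => PySem.Set.add s p.2)

def addPairW (w : List (PySem.Set String)) (p : Int × String) : List (PySem.Set String) :=
  addWave w p.1 p.2

def depthOfI (cs : List Char) : Int := (cs.count '/' : Int) + 1

-- the (depth, string) pairs A inserts for one path, in A's order (deepest first, root last)
def chainA (cs : List Char) : List (Int × String) :=
  if hp : cs = [] then [((0 : Int), "")]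
  else
    (depthOfI cs, (String.ofList cs)) ::
      (match hr : rsplitSlash cs with
       | some (a, _b) => chainA a
       | none => chainA [])
termination_by cs.length
decreasing_by
  · have h := rsplitSlash_some_append hr
    subst h; simp
  · simp only [List.length_nil]
    cases cs with
    | nil => exact absurd rfl hp
    | cons c r => simp

-- the (depth, string) pairs B inserts for one path, in B's order (left to right)
def bScan (pref : List Char) (depth : Int) : List Char → List (Int × String)
  | [] => []
  | c :: r =>
    if c = '/' then
      (if pref ≠ [] then [(depth, (String.ofList pref))] else []) ++ bScan (pref ++ [c]) (depth + 1) r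
    else bScan (pref ++ [c]) depth r

def bAdds (cs : List Char) : List (Int × String) :=
  bScan [] 1 cs ++ (if cs = [] then [] else [(depthOfI cs, (String.ofList cs))])

-- ---- splitOn "/" : only its length is used by A ----
def splitS : List Char → List (List Char)
  | [] => [[]]
  | c :: r => if c = '/' then [] :: splitS r else (splitS r).modifyHead (fun h => c :: h)

lemma splitS_ne_nil (cs : List Char) : splitS cs ≠ [] := by
  cases cs with
  | nil => simp [splitS]
  | cons c r =>
    by_cases hc : c = '/'
    · simp [splitS, hc]
    · simp only [splitS, if_neg hc]
      cases h : splitS r with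
      | nil => exact absurd h (splitS_ne_nil r)
      | cons a t => simp

lemma splitS_cons_exists (cs : List Char) : ∃ hd tl, splitS cs = hd :: tl := by
  cases hsp : splitS cs with
  | nil => exact absurd hsp (splitS_ne_nil cs)
  | cons a t => exact ⟨a, t, rfl⟩

lemma splitOn_go_nil (n : Nat) (cur : List Char) (acc : List (List Char)) :
    PySem.Chars.splitOn.go ['/'] (n + 1) [] cur acc = (cur.reverse :: acc).reverse := by
  rw [PySem.Chars.splitOn.go.eq_def]

lemma splitOn_go_cons (n : Nat) (c : Char) (rest cur : List Char) (acc : List (List Char)) :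
    PySem.Chars.splitOn.go ['/'] (n + 1) (c :: rest) cur acc =
      if List.isPrefixOf ['/'] (c :: rest) then
        PySem.Chars.splitOn.go ['/'] n rest [] (cur.reverse :: acc)
      else PySem.Chars.splitOn.go ['/'] n rest (c :: cur) acc := by
  rw [PySem.Chars.splitOn.go.eq_def]; rfl

lemma splitS_go_spec : ∀ (fuel : Nat) (l cur : List Char) (acc : List (List Char))
    (_h : l.length < fuel),
    PySem.Chars.splitOn.go ['/'] fuel l cur acc =
      acc.reverse ++ (splitS l).modifyHead (fun hd => cur.reverse ++ hd) := by
  intro fuel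
  induction fuel with
  | zero => intro l cur acc h; omega
  | succ n ih =>
    intro l cur acc h
    cases l with
    | nil =>
      rw [splitOn_go_nil]
      simp [splitS]
    | cons c rest =>
      have hlen : rest.length < n := by simpa using h
      obtain ⟨hd, tl, hst⟩ := splitS_cons_exists rest
      rw [splitOn_go_cons]
      by_cases hc : c = '/'
      · rw [if_pos (by simp [List.isPrefixOf, hc])]
        rw [ih rest [] (List.reverse cur :: acc) hlen]
        simp [splitS, hc, hst]
      · rw [if_neg (by simp [List.isPrefixOf]; intro hcc; exact hc hcc.symm)]
        rw [ih rest (c :: cur) acc hlen]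
        simp [splitS, hc, hst]

lemma splitOn_slash_eq (cs : List Char) : PySem.Chars.splitOn cs ['/'] = splitS cs := by
  rw [PySem.Chars.splitOn, splitS_go_spec (cs.length + 1) cs [] [] (by omega)]
  obtain ⟨hd, tl, hst⟩ := splitS_cons_exists cs
  simp [hst]

lemma length_splitS (cs : List Char) : (splitS cs).length = cs.count '/' + 1 := by
  induction cs with
  | nil => simp [splitS]
  | cons c r ih =>
    by_cases hc : c = '/' <;> simp [splitS, hc, ih, List.count_cons]

lemma length_splitOn_slash (cs : List Char) :
    (PySem.Chars.splitOn cs ['/']).length = cs.count '/' + 1 := by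
  rw [splitOn_slash_eq, length_splitS]

-- ---- A's loop = folding chainA ----
theorem awLoop_eq (d : PySem.Dict Int (PySem.Set String)) (cs : List Char) :
    awLoop d cs = (chainA cs).foldl addPairA d := by
  rw [awLoop.eq_def, chainA.eq_def]
  by_cases hp : cs = []
  · subst hp
    simp [addPairA, depthOfI]
  · rw [dif_neg hp, dif_neg hp]
    have hdep : (if cs = [] then (0 : Int) else ((PySem.Chars.splitOn cs ['/']).length : Int)) =
        depthOfI cs := by
      rw [if_neg hp, length_splitOn_slash]; simp [depthOfI]
    cases hr : rsplitSlash cs with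
    | some ab =>
      obtain ⟨a, b⟩ := ab
      simp only [hdep, List.foldl_cons]
      rw [awLoop_eq _ a]
      rfl
    | none =>
      simp only [hdep, List.foldl_cons]
      rw [awLoop_eq _ []]
      rfl
termination_by cs.length
decreasing_by
  all_goals first
    | (have h := rsplitSlash_some_append hr
       subst h; simp)
    | (simp only [List.length_nil]
       cases cs with
       | nil => exact absurd rfl hp
       | cons c r => simp)

-- ---- B's per-path function = folding bAdds ----
lemma eq_ofList_of_toList_eq {s : String} {l : List Char} (h : s.toList = l) :
    s = String.ofList l := by
  have h2 := congrArg String.ofList h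
  rw [String.ofList_toList] at h2
  exact h2

lemma ofList_eq_empty_iff (l : List Char) : String.ofList l = "" ↔ l = [] := by
  constructor
  · intro h
    have := congrArg String.toList h
    simpa [String.toList_ofList] using this
  · intro h; subst h; rfl

lemma bwFold (path : String) : ∀ (r pref : List Char) (w : List (PySem.Set String)) (depth : Int),
    path.toList = pref ++ r → depth = 1 + (pref.count '/' : Int) →
    (PySem.List.enumerate r (pref.length : Int)).foldl
      (fun (st : List (PySem.Set String) × Int) ic =>
        if ic.2 = '/' then
          let pre := PySem.Str.slice path none (some ic.1)
          if pre ≠ "" then (addWave st.1 st.2 pre, st.2 + 1) else (st.1, st.2 + 1)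
        else st)
      (w, depth)
      = ((bScan pref depth r).foldl addPairW w, depth + (r.count '/' : Int)) := by
  intro r
  induction r with
  | nil => intro pref w depth hsplit hdep; simp [PySem.List.enumerate, bScan]
  | cons c rest ih =>
    intro pref w depth hsplit hdep
    rw [show PySem.List.enumerate (c :: rest) (pref.length : Int) =
        ((pref.length : Int), c) :: PySem.List.enumerate rest ((pref.length : Int) + 1) from by
      simp [PySem.List.enumerate]]
    rw [List.foldl_cons]
    have hsplit' : path.toList = (pref ++ [c]) ++ rest := by simpa using hsplit
    have hlen : ((pref ++ [c]).length : Int) = (pref.length : Int) + 1 := by simp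
    by_cases hc : c = '/'
    · have hpre : PySem.Str.slice path none (some (pref.length : Int)) = String.ofList pref := by
        have ht : (PySem.Str.slice path none (some (pref.length : Int))).toList = pref := by
          rw [PySem.Str.toList_slice, PySem.Chars.slice_eq_listSlice,
            PySem.List.slice_to _ (by positivity)]
          rw [hsplit]
          simp
        exact eq_ofList_of_toList_eq ht
      simp only [if_pos hc, hpre]
      have hemp : (String.ofList pref ≠ "") ↔ pref ≠ [] := not_congr (ofList_eq_empty_iff pref)
      have hcount : ((pref ++ [c]).count '/' : Int) = (pref.count '/' : Int) + 1 := by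
        simp [hc]
      have hnext := fun w' => ih (pref ++ [c]) w' (depth + 1) hsplit'
        (by rw [hdep, hcount]; ring)
      by_cases hp : pref = []
      · rw [if_neg (by simp [hemp, hp])]
        have h2 := hnext w
        rw [hlen] at h2
        rw [h2]
        subst hp
        simp only [bScan, if_pos hc, ne_eq, not_true_eq_false, if_neg (by simp : ¬([] : List Char) ≠ []),
          List.nil_append, List.count_cons, Prod.mk.injEq]
        refine ⟨rfl, ?_⟩
        push_cast [hc]
        simp only [if_true]
        ring
      · rw [if_pos (hemp.mpr hp)]
        have h2 := hnext (addWave w depth (String.ofList pref))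
        rw [hlen] at h2
        rw [h2]
        simp only [bScan, if_pos hc, ne_eq, if_pos hp, List.count_cons, Prod.mk.injEq,
          List.singleton_append, List.foldl_cons]
        refine ⟨rfl, ?_⟩
        push_cast [hc]
        simp only [if_true]
        ring
    · simp only [if_neg (by simpa using hc)]
      have hcount : ((pref ++ [c]).count '/' : Int) = (pref.count '/' : Int) := by
        simp [List.count_singleton, hc]
      have := ih (pref ++ [c]) w depth hsplit' (by rw [hdep, hcount])
      rw [hlen] at this
      rw [this]
      simp [bScan, hc, List.count_cons]

lemma bwPath_eq (w : List (PySem.Set String)) (path : String) :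
    bwPath w path = (bAdds path.toList).foldl addPairW w := by
  unfold bwPath
  have h := bwFold path path.toList [] w 1 (by simp) (by simp)
  simp only [List.length_nil, Int.natCast_zero] at h
  rw [h]
  by_cases hp : path = ""
  · subst hp
    simp [bAdds, bScan]
  · have hcs : path.toList ≠ [] := by
      intro hn
      exact hp ((eq_ofList_of_toList_eq hn).trans rfl)
    simp only [if_pos hp, bAdds, if_neg hcs, List.foldl_append, List.foldl_cons, List.foldl_nil]
    have : addWave ((bScan [] 1 path.toList).foldl addPairW w) (1 + (path.toList.count '/' : Int))
        path = addPairW ((bScan [] 1 path.toList).foldl addPairW w)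
          (depthOfI path.toList, String.ofList path.toList) := by
      simp [addPairW, depthOfI, String.ofList_toList]
      ring_nf
    rw [this]

lemma bScan_append (x : List Char) : ∀ (y pref : List Char) (depth : Int),
    bScan pref depth (x ++ y) =
      bScan pref depth x ++ bScan (pref ++ x) (depth + (x.count '/' : Int)) y := by
  induction x with
  | nil => intro y pref depth; simp [bScan]
  | cons c r ih =>
    intro y pref depth
    by_cases hc : c = '/'
    · simp only [List.cons_append, bScan, if_pos hc]
      rw [ih y (pref ++ [c]) (depth + 1)]
      simp [List.count_cons, hc]
      ring_nf
    · simp only [List.cons_append, bScan, if_neg hc]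
      rw [ih y (pref ++ [c]) depth]
      simp [List.count_cons, hc]

lemma bScan_no_slash : ∀ (r : List Char), '/' ∉ r → ∀ (pref : List Char) (depth : Int),
    bScan pref depth r = [] := by
  intro r
  induction r with
  | nil => intro _ pref depth; rfl
  | cons c t ih =>
    intro h pref depth
    simp only [List.mem_cons, not_or] at h
    simp only [bScan, if_neg (fun (hc : c = '/') => h.1 hc.symm)]
    exact ih h.2 _ _

lemma chainA_nil : chainA [] = [((0 : Int), "")] := by
  rw [chainA.eq_def]; simp

-- ---- the core identity: A's chain is B's additions reversed plus the root ----
theorem chainA_eq_bAdds (cs : List Char) :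
    chainA cs = (bAdds cs).reverse ++ [((0 : Int), "")] := by
  rw [chainA.eq_def]
  by_cases hp : cs = []
  · subst hp
    simp [bAdds, bScan]
  · rw [dif_neg hp]
    cases hr : rsplitSlash cs with
    | none =>
      have hns := not_mem_of_rsplitSlash_none hr
      simp only [chainA_nil]
      unfold bAdds
      rw [bScan_no_slash cs hns [] 1, if_neg hp]
      simp
    | some ab =>
      obtain ⟨a, b⟩ := ab
      obtain ⟨hcs, hb⟩ := rsplitSlash_some_eq hr
      subst hcs
      have hstep : bAdds (a ++ '/' :: b) =
          bAdds a ++ [(depthOfI (a ++ '/' :: b), String.ofList (a ++ '/' :: b))] := by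
        unfold bAdds
        rw [bScan_append a ('/' :: b) [] 1]
        simp only [List.nil_append, bScan, if_pos rfl]
        rw [bScan_no_slash b hb _ _]
        rw [if_neg (by simp : ¬(a ++ '/' :: b) = [])]
        have hdp : (1 + (a.count '/' : Int)) = depthOfI a := by simp [depthOfI]; ring
        by_cases ha : a = []
        · subst ha
          simp
        · rw [if_pos (by simpa using ha), if_neg ha, hdp]
          simp [ha]
      rw [hstep, List.reverse_append]
      simp only [List.reverse_singleton, List.singleton_append, List.cons_append,
        List.nil_append]
      rw [← chainA_eq_bAdds a]
termination_by cs.length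

-- ---- bucket characterisations: the dict side ----
lemma mem_getD_addPairsA (l : List (Int × String)) (d : PySem.Dict Int (PySem.Set String))
    (k : Int) (x : String) :
    x ∈ (l.foldl addPairA d).getD k PySem.Set.empty ↔
      x ∈ d.getD k PySem.Set.empty ∨ (k, x) ∈ l := by
  induction l generalizing d with
  | nil => simp
  | cons p t ih =>
    obtain ⟨k', v⟩ := p
    rw [List.foldl_cons, ih]
    by_cases hk : k = k'
    · subst hk
      simp only [addPairA, PySem.Dict.getD_modify_self, PySem.Set.mem_add, List.mem_cons,
        Prod.mk.injEq, true_and]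
      tauto
    · simp only [addPairA, PySem.Dict.getD_modify_of_ne _ _ _ hk, List.mem_cons, Prod.mk.injEq]
      constructor
      · intro h; tauto
      · rintro (h | ⟨h1, h2⟩ | h)
        · tauto
        · exact absurd h1 hk
        · tauto

lemma nodup_getD_addPairsA (l : List (Int × String)) (d : PySem.Dict Int (PySem.Set String))
    (h : ∀ k, (d.getD k PySem.Set.empty).Nodup) (k : Int) :
    ((l.foldl addPairA d).getD k PySem.Set.empty).Nodup := by
  induction l generalizing d with
  | nil => exact h k
  | cons p t ih =>
    rw [List.foldl_cons]
    refine ih _ (fun k' => ?_)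
    by_cases hk : k' = p.1
    · subst hk
      rw [addPairA, PySem.Dict.getD_modify_self]
      exact PySem.Set.nodup_add _ _ (h _)
    · rw [addPairA, PySem.Dict.getD_modify_of_ne _ _ _ hk]
      exact h _

lemma mem_keys_addPairsA (l : List (Int × String)) (d : PySem.Dict Int (PySem.Set String))
    (k : Int) :
    k ∈ (l.foldl addPairA d).keys ↔ k ∈ d.keys ∨ k ∈ l.map Prod.fst := by
  induction l generalizing d with
  | nil => simp
  | cons p t ih =>
    rw [List.foldl_cons, ih]
    rw [addPairA, PySem.Dict.keys_modify]
    rw [show ∀ (d' : PySem.Dict Int (PySem.Set String)) v, k ∈ (d'.insert p.1 v).keys ↔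
        (k = p.1 ∨ k ∈ d'.keys) from fun d' v => PySem.Dict.mem_keys_insert d' p.1 k v]
    simp only [List.map_cons, List.mem_cons]
    tauto

lemma nodup_keys_addPairsA (l : List (Int × String)) (d : PySem.Dict Int (PySem.Set String))
    (h : d.keys.Nodup) : (l.foldl addPairA d).keys.Nodup := by
  induction l generalizing d with
  | nil => exact h
  | cons p t ih =>
    rw [List.foldl_cons]
    refine ih _ ?_
    rw [addPairA, PySem.Dict.keys_modify]
    exact PySem.Dict.nodup_keys_insert _ _ _ h

-- ---- bucket characterisations: the waves side ----
lemma getD_append_empty (w : List (PySem.Set String)) (i : Nat) :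
    (w ++ [PySem.Set.empty]).getD i PySem.Set.empty = w.getD i PySem.Set.empty := by
  induction w generalizing i with
  | nil => cases i <;> simp [List.getD, PySem.Set.empty]
  | cons a t ih =>
    cases i with
    | zero => simp
    | succ j => simpa using ih j

theorem getD_padWaves (w : List (PySem.Set String)) (depth : Int) (i : Nat) :
    (padWaves w depth).getD i PySem.Set.empty = w.getD i PySem.Set.empty := by
  rw [padWaves.eq_def]
  by_cases h : (w.length : Int) ≤ depth
  · rw [dif_pos h, getD_padWaves _ depth i, getD_append_empty]
  · rw [dif_neg h]
termination_by (depth + 1 - w.length).toNat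
decreasing_by
  simp only [List.length_append, List.length_cons, List.length_nil]
  omega

theorem lt_length_padWaves (w : List (PySem.Set String)) (depth : Int) (h : 0 ≤ depth) :
    depth.toNat < (padWaves w depth).length := by
  rw [padWaves.eq_def]
  by_cases hl : (w.length : Int) ≤ depth
  · rw [dif_pos hl]
    exact lt_length_padWaves _ depth h
  · rw [dif_neg hl]
    omega
termination_by (depth + 1 - w.length).toNat
decreasing_by
  simp only [List.length_append, List.length_cons, List.length_nil]
  omega

lemma getD_addWave_nat (w : List (PySem.Set String)) (n : Nat) (s : String) (i : Nat) :
    (addWave w (n : Int) s).getD i PySem.Set.empty =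
      if i = n then (w.getD i PySem.Set.empty).add s
      else w.getD i PySem.Set.empty := by
  unfold addWave
  rw [PySem.List.pySetD_natCast, PySem.List.pyGetD_natCast]
  have hlen' : n < (padWaves w (n : Int)).length := by
    have := lt_length_padWaves w (n : Int) (by positivity)
    simpa using this
  by_cases hii : i = n
  · subst hii
    rw [if_pos rfl, List.getD_eq_getElem?_getD, List.getElem?_set_self hlen']
    simp only [Option.getD_some]
    rw [getD_padWaves]
  · rw [if_neg hii, List.getD_eq_getElem?_getD,
      List.getElem?_set_ne (fun hh => hii hh.symm), ← List.getD_eq_getElem?_getD, getD_padWaves]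

lemma getD_addWave (w : List (PySem.Set String)) (depth : Int) (s : String)
    (h : 0 ≤ depth) (i : Nat) :
    (addWave w depth s).getD i PySem.Set.empty =
      if (i : Int) = depth then (w.getD i PySem.Set.empty).add s
      else w.getD i PySem.Set.empty := by
  obtain ⟨n, rfl⟩ : ∃ n : Nat, depth = (n : Int) := ⟨depth.toNat, by omega⟩
  rw [getD_addWave_nat]
  simp [Int.natCast_inj]

lemma mem_getD_addPairsW (l : List (Int × String)) (hpos : ∀ p ∈ l, 1 ≤ p.1)
    (w : List (PySem.Set String)) (i : Nat) (x : String) :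
    x ∈ (l.foldl addPairW w).getD i PySem.Set.empty ↔
      x ∈ w.getD i PySem.Set.empty ∨ ((i : Int), x) ∈ l := by
  induction l generalizing w with
  | nil => simp
  | cons p t ih =>
    obtain ⟨k', v⟩ := p
    rw [List.foldl_cons, ih (fun q hq => hpos q (List.mem_cons_of_mem _ hq)) _]
    have h0 : (0 : Int) ≤ k' := le_trans (by norm_num) (hpos _ (List.mem_cons_self ..))
    simp only [addPairW]
    rw [getD_addWave _ _ _ h0]
    by_cases hi : ((i : Nat) : Int) = k'
    · rw [if_pos hi]
      simp only [PySem.Set.mem_add, List.mem_cons, Prod.mk.injEq, hi, true_and]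
      tauto
    · rw [if_neg hi]
      simp only [List.mem_cons, Prod.mk.injEq]
      constructor
      · intro h; tauto
      · rintro (h | ⟨h1, h2⟩ | h)
        · tauto
        · exact absurd h1 hi
        · tauto

lemma nodup_getD_addPairsW (l : List (Int × String)) (hpos : ∀ p ∈ l, 1 ≤ p.1)
    (w : List (PySem.Set String)) (h : ∀ i, (w.getD i PySem.Set.empty).Nodup) (i : Nat) :
    ((l.foldl addPairW w).getD i PySem.Set.empty).Nodup := by
  induction l generalizing w with
  | nil => exact h i
  | cons p t ih =>
    rw [List.foldl_cons]
    refine ih (fun q hq => hpos q (List.mem_cons_of_mem _ hq)) _ (fun j => ?_)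
    have h0 : (0 : Int) ≤ p.1 := le_trans (by norm_num) (hpos p (List.mem_cons_self ..))
    rw [addPairW, getD_addWave _ _ _ h0]
    by_cases hj : ((j : Nat) : Int) = p.1
    · rw [if_pos hj]; exact PySem.Set.nodup_add _ _ (h j)
    · rw [if_neg hj]; exact h j

-- ---- depths recorded by B are ≥ 1 ----
lemma bScan_depth_le : ∀ (r pref : List Char) (depth : Int) (q : Int × String),
    q ∈ bScan pref depth r → depth ≤ q.1 := by
  intro r
  induction r with
  | nil => intro pref depth q hq; simp [bScan] at hq
  | cons c t ih =>
    intro pref depth q hq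
    by_cases hc : c = '/'
    · rw [bScan, if_pos hc] at hq
      rcases List.mem_append.mp hq with h | h
      · by_cases hp : pref = []
        · simp [hp] at h
        · simp only [if_pos (by simpa using hp), List.mem_singleton] at h
          subst h
          exact le_refl _
      · have := ih (pref ++ [c]) (depth + 1) q h
        omega
    · rw [bScan, if_neg hc] at hq
      exact ih _ _ _ hq

lemma bAdds_pos (cs : List Char) (q : Int × String) (hq : q ∈ bAdds cs) : 1 ≤ q.1 := by
  unfold bAdds at hq
  rcases List.mem_append.mp hq with h | h
  · exact bScan_depth_le cs [] 1 q h
  · by_cases hc : cs = []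
    · simp [hc] at h
    · rw [if_neg hc, List.mem_singleton] at h
      subst h
      simp only [depthOfI]
      omega

-- ---- filter as an index filter ----
lemma filter_eq_map_range {α : Type} (w : List α) (p : α → Bool) (d : α) :
    w.filter p = ((List.range w.length).filter (fun i => p (w.getD i d))).map
      (fun i => w.getD i d) := by
  induction w with
  | nil => simp
  | cons a t ih =>
    rw [List.length_cons, List.range_succ_eq_map]
    cases hpa : p a <;>
      simp [hpa, List.filter_cons, List.filter_map, Function.comp_def, List.map_map, ih]

-- ---- folding whole path lists ----
lemma foldl_awLoop (paths : List String) (d : PySem.Dict Int (PySem.Set String)) :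
    paths.foldl (fun acc path => awLoop acc path.toList) d
      = (paths.flatMap (fun p => chainA p.toList)).foldl addPairA d := by
  induction paths generalizing d with
  | nil => rfl
  | cons p t ih =>
    rw [List.foldl_cons, List.flatMap_cons, List.foldl_append, awLoop_eq, ih]

lemma foldl_bwPath (paths : List String) (w : List (PySem.Set String)) :
    paths.foldl bwPath w
      = (paths.flatMap (fun p => bAdds p.toList)).foldl addPairW w := by
  induction paths generalizing w with
  | nil => rfl
  | cons p t ih =>
    rw [List.foldl_cons, List.flatMap_cons, List.foldl_append, bwPath_eq, ih]

lemma mem_chainA_iff (cs : List Char) (q : Int × String) :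
    q ∈ chainA cs ↔ q ∈ bAdds cs ∨ q = ((0 : Int), "") := by
  rw [chainA_eq_bAdds]
  simp [List.mem_append, List.mem_reverse]

lemma ofList_root : (PySem.Set.ofList [""] : PySem.Set String) = [""] := by rfl

-- ===== VERDICT (by name: the statement is the Claim_ definition above) =====
theorem compute_waves_spec : Claim_equal_compute_waves := by
  intro paths _dom
  unfold Spec_compute_waves compute_waves compute_waves_alt
  by_cases hp : paths = []
  · subst hp; rfl
  · have hne : paths.isEmpty = false := by simp [hp]
    rw [if_neg (by simp [hne]), if_neg (by simp [hne])]
    set P := paths.flatMap (fun p => chainA p.toList) with hP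
    set W := paths.flatMap (fun p => bAdds p.toList) with hW
    set w0 : List (PySem.Set String) := [PySem.Set.ofList [""]] with hw0def
    set df := P.foldl addPairA PySem.Dict.empty with hdf
    set wf := W.foldl addPairW w0 with hwf
    rw [foldl_awLoop, foldl_bwPath, ← hP, ← hW, ← hdf, ← hwf]
    dsimp only
    -- basic facts
    have hWpos : ∀ q ∈ W, 1 ≤ q.1 := by
      intro q hq
      rw [hW, List.mem_flatMap] at hq
      obtain ⟨p, _, hq⟩ := hq
      exact bAdds_pos _ _ hq
    have hw0get : ∀ (i : Nat) (x : String),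
        x ∈ w0.getD i PySem.Set.empty ↔ i = 0 ∧ x = "" := by
      intro i x
      cases i with
      | zero => simp [hw0def, ofList_root]
      | succ j => simp [hw0def, List.getD, PySem.Set.empty]
    have hbA : ∀ (k : Int) (x : String), x ∈ df.getD k PySem.Set.empty ↔ (k, x) ∈ P := by
      intro k x
      rw [hdf, mem_getD_addPairsA, PySem.Dict.getD_empty]
      simp [PySem.Set.empty]
    have hbW : ∀ (i : Nat) (x : String),
        x ∈ wf.getD i PySem.Set.empty ↔ (i = 0 ∧ x = "") ∨ ((i : Int), x) ∈ W := by
      intro i x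
      rw [hwf, mem_getD_addPairsW W hWpos, hw0get]
    have hPW : ∀ (k : Int) (x : String), (k, x) ∈ P ↔ ((k, x) ∈ W ∨ (k = 0 ∧ x = "")) := by
      intro k x
      rw [hP, hW]
      simp only [List.mem_flatMap]
      constructor
      · rintro ⟨p, hpmem, hq⟩
        rcases (mem_chainA_iff _ _).mp hq with h | h
        · exact Or.inl ⟨p, hpmem, h⟩
        · right
          rw [Prod.mk.injEq] at h
          exact h
      · rintro (⟨p, hpmem, hq⟩ | ⟨h1, h2⟩)
        · exact ⟨p, hpmem, (mem_chainA_iff _ _).mpr (Or.inl hq)⟩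
        · obtain ⟨p, hpmem⟩ := List.exists_mem_of_ne_nil paths hp
          exact ⟨p, hpmem, (mem_chainA_iff _ _).mpr (Or.inr (by rw [h1, h2]))⟩
    have hAB : ∀ (i : Nat) (x : String),
        x ∈ df.getD (i : Int) PySem.Set.empty ↔ x ∈ wf.getD i PySem.Set.empty := by
      intro i x
      rw [hbA, hbW, hPW]
      have : ((i : Int) = 0) ↔ i = 0 := by omega
      tauto
    have ndA : ∀ k, (df.getD k PySem.Set.empty).Nodup := by
      intro k
      rw [hdf]
      exact nodup_getD_addPairsA _ _ (fun k' => by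
        rw [PySem.Dict.getD_empty]; exact List.nodup_nil) k
    have ndW : ∀ i, (wf.getD i PySem.Set.empty).Nodup := by
      intro i
      rw [hwf]
      refine nodup_getD_addPairsW W hWpos _ (fun j => ?_) i
      cases j with
      | zero => simp [hw0def, ofList_root]
      | succ m => simp [hw0def, List.getD, PySem.Set.empty]
    have ndK : df.keys.Nodup := by
      rw [hdf]
      exact nodup_keys_addPairsA _ _ (by rw [PySem.Dict.keys_empty]; exact List.nodup_nil)
    have hkeys : ∀ k : Int, k ∈ df.keys ↔
        (0 ≤ k ∧ k.toNat < wf.length ∧ wf.getD k.toNat PySem.Set.empty ≠ []) := by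
      intro k
      rw [hdf, mem_keys_addPairsA, PySem.Dict.keys_empty]
      simp only [List.not_mem_nil, false_or, List.mem_map]
      constructor
      · rintro ⟨q, hq, hfst⟩
        obtain ⟨k', x⟩ := q
        subst hfst
        have hx : (k', x) ∈ P := hq
        have h0 : 0 ≤ k' := by
          rcases (hPW k' x).mp hx with h | h
          · have := hWpos _ h; omega
          · omega
        have hxb : x ∈ wf.getD k'.toNat PySem.Set.empty := by
          rw [← hAB, show ((k'.toNat : Nat) : Int) = k' from by omega, hbA]
          exact hx
        refine ⟨h0, ?_, fun hnil => by rw [hnil] at hxb; exact List.not_mem_nil hxb⟩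
        by_contra hlen
        rw [List.getD_eq_default _ _ (by omega)] at hxb
        exact List.not_mem_nil hxb
      · rintro ⟨h0, hlen, hnil⟩
        obtain ⟨x, hx⟩ := List.exists_mem_of_ne_nil _ hnil
        rw [← show ((k.toNat : Nat) : Int) = k from by omega] at *
        rw [← hAB, hbA] at hx
        exact ⟨(((k.toNat : Nat) : Int), x), hx, rfl⟩
    -- the descending index list
    set Kasc := ((List.range wf.length).filter
      (fun i => !(wf.getD i PySem.Set.empty).isEmpty)).map (fun i : Nat => (i : Int)) with hKasc
    have hKmem : ∀ k : Int, k ∈ Kasc ↔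
        (0 ≤ k ∧ k.toNat < wf.length ∧ wf.getD k.toNat PySem.Set.empty ≠ []) := by
      intro k
      rw [hKasc]
      simp only [List.mem_map, List.mem_filter, List.mem_range]
      constructor
      · rintro ⟨i, ⟨hi, hne⟩, rfl⟩
        refine ⟨by omega, by simpa using hi, ?_⟩
        simp only [Int.toNat_natCast]
        simpa using hne
      · rintro ⟨h0, hlen, hne⟩
        refine ⟨k.toNat, ⟨hlen, by simpa using hne⟩, by omega⟩
    have hKnodup : Kasc.Nodup := by
      rw [hKasc]
      refine List.Nodup.map (fun a b h => by omega) (List.Nodup.filter _ (List.nodup_range))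
    have hperm : Kasc.reverse.Perm df.keys := by
      rw [(List.perm_ext_iff_of_nodup (List.nodup_reverse.mpr hKnodup) ndK)]
      intro k
      rw [List.mem_reverse, hKmem, hkeys]
    have hpair : Kasc.reverse.Pairwise (fun a b => (fun x : Int => x) b < (fun x : Int => x) a) := by
      rw [List.pairwise_reverse]
      rw [hKasc]
      refine List.Pairwise.map _ (fun a b h => by simpa using h)
        (List.Pairwise.filter _ List.pairwise_lt_range)
    rw [PySem.List.sorted_rev_eq_of_perm_of_pairwise_gt df.keys Kasc.reverse
      (fun k => k) hperm hpair]
    rw [List.map_reverse, List.filter_reverse, List.map_reverse]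
    congr 1
    rw [filter_eq_map_range wf (fun s => !s.isEmpty) PySem.Set.empty, List.map_map, List.map_map]
    refine List.map_congr_left (fun i hi => ?_)
    simp only [Function.comp_apply]
    refine PySem.List.sorted_eq_sorted_of_perm _ _ _ (fun a b h => h) ?_
    rw [List.perm_ext_iff_of_nodup (ndA _) (ndW _)]
    intro x
    exact hAB i x
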